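-- pv_equiv track=rewrite | github.com/BestPlayerMMIII/clim | Converter/encoder/frames_encoder.py | generate_rle_indices_and_codebook
-- ===== SOURCE A (Python) =====
-- from typing import List, Dict, Tuple
--
-- def generate_rle_indices_and_codebook(
--     huffman_codes: Dict[Tuple[int, int, int], str],
--     flat_frame: List[Tuple[int, int, int]]
-- ) -> Tuple[List[Tuple[int, int]], Dict[int, str]]:
--     """
--     Transform a dictionary of Huffman codes (indexed by RGB tuples) into RLE indices and a Huffman codebook.
--
--     Args:
--         huffman_codes (Dict[Tuple[int, int, int], str]): Huffman codes indexed by RGB tuples.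
--         flat_frame (List[Tuple[int, int, int]]): Pixels of the frame to process (scanned line by line or in another order).
--
--     Returns:
--         Tuple[List[Tuple[int, int]], Dict[int, str]]:
--             - rle_indices: List of tuples (codebook index, consecutive count).
--             - huffman_codebook: Huffman codebook with integer indices.
--     """
--     # Create mapping from RGB tuples to indices and the Huffman codebook
--     colors_indices = {rgb: i for i, rgb in enumerate(huffman_codes)}
--     huffman_codebook = dict(enumerate(huffman_codes.values()))
--
--     # Initialize variables for RLE
--     rle_indices = []
--     current_index, current_count = None, 0
--
--     # Iterate through pixels and generate RLE indices
--     for pixel in flat_frame: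
--         index = colors_indices[pixel]
--         if index == current_index:
--             current_count += 1
--         else:
--             if current_index is not None:
--                 rle_indices.append((current_index, current_count))
--             current_index, current_count = index, 1
--
--     # Append the final block if it exists
--     if current_index is not None:
--         rle_indices.append((current_index, current_count))
--
--     return rle_indices, huffman_codebook
-- ===== SOURCE B (Python) =====
-- from typing import List, Dict, Tuple
--
-- def generate_rle_indices_and_codebook(
--     huffman_codes: Dict[Tuple[int, int, int], str],
--     flat_frame: List[Tuple[int, int, int]]
-- ) -> Tuple[List[Tuple[int, int]], Dict[int, str]]:
--     colors_indices = {rgb: i for i, rgb in enumerate(huffman_codes)}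
--     huffman_codebook = dict(enumerate(huffman_codes.values()))
--     # RLE by change-point detection: positions where the index stream changes,
--     # then run lengths as differences of consecutive change points.
--     indices = [colors_indices[pixel] for pixel in flat_frame]
--     n = len(indices)
--     starts = [j for j in range(n) if j == 0 or indices[j] != indices[j - 1]]
--     rle_indices = [(indices[s], t - s) for s, t in zip(starts, starts[1:] + [n])]
--     return rle_indices, huffman_codebook
-- ===== Notes on version B (the rewrite author's own statement) =====
-- stated objective: alternative
-- what changed: The stateful RLE accumulation loop (current_index/current_count with a trailing flush) is replaced by change-point detection: map pixels to indices, collect the positions where the index differs from its predecessor, and obtain each run length as the difference of consecutive change points.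
import Mathlib
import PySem

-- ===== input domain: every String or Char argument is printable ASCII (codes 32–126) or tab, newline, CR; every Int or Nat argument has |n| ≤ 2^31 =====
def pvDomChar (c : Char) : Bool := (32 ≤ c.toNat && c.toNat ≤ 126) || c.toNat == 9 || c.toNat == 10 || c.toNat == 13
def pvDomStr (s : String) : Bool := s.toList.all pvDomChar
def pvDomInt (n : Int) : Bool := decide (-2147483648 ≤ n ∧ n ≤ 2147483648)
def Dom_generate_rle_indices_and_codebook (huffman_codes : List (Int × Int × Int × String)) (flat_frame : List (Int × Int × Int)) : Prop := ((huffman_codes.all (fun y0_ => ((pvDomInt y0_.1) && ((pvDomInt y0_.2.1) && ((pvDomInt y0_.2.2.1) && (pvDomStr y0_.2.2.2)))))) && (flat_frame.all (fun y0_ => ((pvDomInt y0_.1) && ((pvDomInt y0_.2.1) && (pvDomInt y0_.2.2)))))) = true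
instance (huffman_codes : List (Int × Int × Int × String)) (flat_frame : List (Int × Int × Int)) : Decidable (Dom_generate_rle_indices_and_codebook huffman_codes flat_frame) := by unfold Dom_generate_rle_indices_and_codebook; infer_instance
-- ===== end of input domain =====

-- B replaces A's stateful current_index/current_count RLE loop (with its trailing flush) by change-point
-- detection: map pixels to indices, list the positions where the index differs from its predecessor,
-- and read each run length off as the difference of consecutive change points.

-- the RGB key of one huffman_codes entry
def pvKey (e : Int × Int × Int × String) : Int × Int × Int := (e.1, e.2.1, e.2.2.1)

-- ===== PORT A =====
-- Python's loop over flat_frame with state (rle_indices, current_index, current_count),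
-- including the final 'if current_index is not None: append'.
-- '(… .get? pixel).getD 0' : the KeyError case (pixel not a codebook key) is excluded by Pre_.
def rleA (colors : PySem.Dict (Int × Int × Int) Int) : List (Int × Int × Int) → Option Int → Int → List (Int × Int)
  | [], none, _ => []
  | [], some c, n => [(c, n)]
  | p :: ps, cur, n =>
    let index := (colors.get? p).getD 0
    if some index == cur then rleA colors ps cur (n + 1)
    else match cur with
      | none => rleA colors ps (some index) 1
      | some c => (c, n) :: rleA colors ps (some index) 1

def generate_rle_indices_and_codebook (huffman_codes : List (Int × Int × Int × String)) (flat_frame : List (Int × Int × Int)) : (List (Int × Int)) × (List (Int × String)) :=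
  let colors_indices : PySem.Dict (Int × Int × Int) Int :=
    (PySem.List.enumerate (huffman_codes.map pvKey)).foldl (fun d p => d.insert p.2 p.1) PySem.Dict.empty
  let huffman_codebook : List (Int × String) := PySem.List.enumerate (huffman_codes.map (fun e => e.2.2.2))
  (rleA colors_indices flat_frame none 0, huffman_codebook)

-- ===== PORT B =====
-- Source B's change-point RLE on the index list: 'starts' are the j with j == 0 or indices[j] != indices[j-1];
-- runs are zip(starts, starts[1:] + [n]) turned into (indices[s], t - s).
-- 'getD j 0' : every position read is in range (j ranges over range(n), starts ⊆ range(n)), so it is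
-- exactly Python's indices[j] there; the '!(· == ·)' is Python's '!='.
def rleCP (indices : List Int) : List (Int × Int) :=
  let n := indices.length
  let starts := (List.range n).filter (fun j => j == 0 || !(indices.getD j 0 == indices.getD (j - 1) 0))
  (starts.zip (starts.drop 1 ++ [n])).map (fun st => (indices.getD st.1 0, (st.2 : Int) - (st.1 : Int)))

def generate_rle_indices_and_codebook_alt (huffman_codes : List (Int × Int × Int × String)) (flat_frame : List (Int × Int × Int)) : (List (Int × Int)) × (List (Int × String)) :=
  let colors_indices : PySem.Dict (Int × Int × Int) Int :=
    (PySem.List.enumerate (huffman_codes.map pvKey)).foldl (fun d p => d.insert p.2 p.1) PySem.Dict.empty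
  let huffman_codebook : List (Int × String) := PySem.List.enumerate (huffman_codes.map (fun e => e.2.2.2))
  let indices : List Int := flat_frame.map (fun pixel => (colors_indices.get? pixel).getD 0)
  (rleCP indices, huffman_codebook)

-- ===== PRECONDITION & SPEC =====
-- Pre_ excludes (i) flat_frame pixels that are not keys of huffman_codes, on which A raises KeyError,
-- and (ii) association lists with duplicate RGB keys, which do not represent any Python dict input.
def Pre_generate_rle_indices_and_codebook (huffman_codes : List (Int × Int × Int × String)) (flat_frame : List (Int × Int × Int)) : Prop :=
  (huffman_codes.map pvKey).Nodup ∧ ∀ p ∈ flat_frame, p ∈ huffman_codes.map pvKey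
instance (huffman_codes : List (Int × Int × Int × String)) (flat_frame : List (Int × Int × Int)) : Decidable (Pre_generate_rle_indices_and_codebook huffman_codes flat_frame) := by unfold Pre_generate_rle_indices_and_codebook; infer_instance

def pvWitness_generate_rle_indices_and_codebook : (List (Int × Int × Int × String)) × (List (Int × Int × Int)) :=
  ([(0, 0, 0, "0"), (1, 0, 0, "10")], [(0, 0, 0), (0, 0, 0), (1, 0, 0), (0, 0, 0)])

def Spec_generate_rle_indices_and_codebook (huffman_codes : List (Int × Int × Int × String)) (flat_frame : List (Int × Int × Int)) (out : (List (Int × Int)) × (List (Int × String))) : Prop := out = generate_rle_indices_and_codebook_alt huffman_codes flat_frame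
instance (huffman_codes : List (Int × Int × Int × String)) (flat_frame : List (Int × Int × Int)) (out : (List (Int × Int)) × (List (Int × String))) : Decidable (Spec_generate_rle_indices_and_codebook huffman_codes flat_frame out) := by unfold Spec_generate_rle_indices_and_codebook; infer_instance

-- ===== CLAIM (what is proved, stated in full; the proofs are below) =====
def Claim_equal_generate_rle_indices_and_codebook : Prop := ∀ (huffman_codes : List (Int × Int × Int × String)) (flat_frame : List (Int × Int × Int)), Dom_generate_rle_indices_and_codebook huffman_codes flat_frame → Pre_generate_rle_indices_and_codebook huffman_codes flat_frame → Spec_generate_rle_indices_and_codebook huffman_codes flat_frame (generate_rle_indices_and_codebook huffman_codes flat_frame)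

-- ===== LEMMAS AND PROOFS =====

-- A's RLE loop over an index list (rleA with the lookup already performed)
def rleIdx : List Int → Option Int → Int → List (Int × Int)
  | [], none, _ => []
  | [], some c, n => [(c, n)]
  | i :: is, cur, n =>
    if some i == cur then rleIdx is cur (n + 1)
    else match cur with
      | none => rleIdx is (some i) 1
      | some c => (c, n) :: rleIdx is (some i) 1

-- runs as (value, length) by take/drop of the leading run — the common middle ground of the two ports
def groupRuns : List Int → List (Int × Int)
  | [] => []
  | x :: xs => (x, 1 + ((xs.takeWhile (fun y => y == x)).length : Int)) :: groupRuns (xs.dropWhile (fun y => y == x))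
termination_by l => l.length
decreasing_by
  simpa using Nat.lt_succ_of_le (List.length_dropWhile_le _ _)

theorem rleA_eq_rleIdx (colors : PySem.Dict (Int × Int × Int) Int) :
    ∀ (ps : List (Int × Int × Int)) (cur : Option Int) (n : Int),
    rleA colors ps cur n = rleIdx (ps.map (fun pixel => (colors.get? pixel).getD 0)) cur n
  | [], none, _ => rfl
  | [], some _, _ => rfl
  | p :: ps, cur, n => by
    simp only [rleA, rleIdx, List.map_cons]
    split
    · exact rleA_eq_rleIdx colors ps cur (n + 1)
    · cases cur with
      | none => exact rleA_eq_rleIdx colors ps _ 1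
      | some c => exact congrArg _ (rleA_eq_rleIdx colors ps _ 1)

theorem rleIdx_some (is : List Int) : ∀ (c n : Int),
    rleIdx is (some c) n =
      (c, n + ((is.takeWhile (fun y => y == c)).length : Int)) :: groupRuns (is.dropWhile (fun y => y == c)) := by
  induction is with
  | nil => intro c n; simp [rleIdx, groupRuns]
  | cons i is ih =>
    intro c n
    by_cases h : i = c
    · subst h
      simp [rleIdx, ih]
      ring
    · have hb : (i == c) = false := beq_false_of_ne h
      have hb' : (some i == some c) = false := by simp [h]
      rw [rleIdx, hb', groupRuns.eq_def]
      simp [hb, ih]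

theorem rleIdx_none (is : List Int) : rleIdx is none 0 = groupRuns is := by
  cases is with
  | nil => simp [rleIdx, groupRuns]
  | cons i is =>
    have hb : (some i == (none : Option Int)) = false := rfl
    rw [rleIdx, hb, groupRuns.eq_def]
    simp [rleIdx_some]

-- B-side analysis: name the change-point condition and list
def cpCond (is : List Int) (j : Nat) : Bool := j == 0 || !(is.getD j 0 == is.getD (j - 1) 0)
def cpStarts (is : List Int) : List Nat := (List.range is.length).filter (cpCond is)

theorem rleCP_eq (is : List Int) :
    rleCP is = ((cpStarts is).zip ((cpStarts is).drop 1 ++ [is.length])).map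
      (fun st => (is.getD st.1 0, (st.2 : Int) - (st.1 : Int))) := rfl

theorem len_split (x : Int) (xs : List Int) :
    xs.length = (xs.takeWhile (fun y => y == x)).length + (xs.dropWhile (fun y => y == x)).length := by
  have h := congrArg List.length (List.takeWhile_append_dropWhile (p := fun y => y == x) (l := xs))
  simp only [List.length_append] at h
  omega

-- positions inside the leading run of x all hold x
theorem t_getD (x : Int) (xs : List Int) {j : Nat} (hj : j < (xs.takeWhile (fun y => y == x)).length) :
    xs.getD j 0 = x := by
  set t := xs.takeWhile (fun y => y == x) with ht
  set d := xs.dropWhile (fun y => y == x) with hd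
  have hx : xs = t ++ d := by rw [ht, hd, List.takeWhile_append_dropWhile]
  rw [hx, List.getD_append _ _ _ _ hj, List.getD_eq_getElem _ _ hj]
  have hm : t[j] ∈ List.takeWhile (fun y => y == x) xs := by rw [← ht]; exact List.getElem_mem hj
  exact eq_of_beq (List.mem_takeWhile_imp (p := fun y => y == x) (l := xs) hm)

theorem cons_getD_le (x : Int) (xs : List Int) {j : Nat}
    (hj : j ≤ (xs.takeWhile (fun y => y == x)).length) : (x :: xs).getD j 0 = x := by
  cases j with
  | zero => rfl
  | succ k => simpa using t_getD x xs (Nat.lt_of_succ_le hj)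

theorem cons_getD_shift (x : Int) (xs : List Int) (j : Nat) :
    (x :: xs).getD ((xs.takeWhile (fun y => y == x)).length + 1 + j) 0 =
      (xs.dropWhile (fun y => y == x)).getD j 0 := by
  have h : (xs.takeWhile (fun y => y == x)).length + 1 + j
      = ((xs.takeWhile (fun y => y == x)).length + j) + 1 := by omega
  rw [h, List.getD_cons_succ]
  set t := xs.takeWhile (fun y => y == x) with ht
  set d := xs.dropWhile (fun y => y == x) with hd
  have hx : xs = t ++ d := by rw [ht, hd, List.takeWhile_append_dropWhile]
  rw [hx, List.getD_append_right _ _ _ _ (Nat.le_add_right _ _)]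
  simp

theorem d_head_ne (x : Int) (xs : List Int) (h : xs.dropWhile (fun y => y == x) ≠ []) :
    ((xs.dropWhile (fun y => y == x)).getD 0 0 == x) = false := by
  have hh := List.head_dropWhile_not (fun y => y == x) (l := xs) h
  cases hd : xs.dropWhile (fun y => y == x) with
  | nil => exact absurd hd h
  | cons a l => simpa [hd] using hh

theorem cpStarts_cons (x : Int) (xs : List Int) :
    cpStarts (x :: xs) =
      0 :: (cpStarts (xs.dropWhile (fun y => y == x))).map
            (fun j => ((xs.takeWhile (fun y => y == x)).length + 1) + j) := by
  have hxs := len_split x xs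
  have hlen : (x :: xs).length
      = ((xs.takeWhile (fun y => y == x)).length + 1) + (xs.dropWhile (fun y => y == x)).length := by
    simp only [List.length_cons]; omega
  unfold cpStarts
  rw [hlen, List.range_add, List.filter_append]
  have h1 : (List.range ((xs.takeWhile (fun y => y == x)).length + 1)).filter (cpCond (x :: xs)) = [0] := by
    rw [List.range_succ_eq_map, List.filter_cons]
    have hc0 : cpCond (x :: xs) 0 = true := by simp [cpCond]
    rw [if_pos hc0, List.filter_map]
    have hnil : (List.range (xs.takeWhile (fun y => y == x)).length).filter
        (cpCond (x :: xs) ∘ Nat.succ) = [] := by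
      rw [List.filter_eq_nil_iff]
      intro j hj
      have hjlt := List.mem_range.mp hj
      have e1 : (x :: xs).getD (j + 1) 0 = x := by simpa using t_getD x xs hjlt
      have e2 : (x :: xs).getD j 0 = x := cons_getD_le x xs (Nat.le_of_lt hjlt)
      simp only [Function.comp_apply, Nat.succ_eq_add_one, cpCond, Nat.add_sub_cancel, e1, e2]
      simp
    rw [hnil]
    rfl
  have h2 : ((List.range (xs.dropWhile (fun y => y == x)).length).map
        (fun y => ((xs.takeWhile (fun y => y == x)).length + 1) + y)).filter (cpCond (x :: xs))
      = (cpStarts (xs.dropWhile (fun y => y == x))).map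
            (fun j => ((xs.takeWhile (fun y => y == x)).length + 1) + j) := by
    rw [List.filter_map]
    unfold cpStarts
    congr 1
    apply List.filter_congr
    intro j hj
    have hjlt := List.mem_range.mp hj
    cases j with
    | zero =>
      have hne : xs.dropWhile (fun y => y == x) ≠ [] := by
        intro hnil; rw [hnil] at hjlt; exact Nat.not_lt_zero _ hjlt
      have e3 : (x :: xs).getD ((xs.takeWhile (fun y => y == x)).length + 1) 0
          = (xs.dropWhile (fun y => y == x)).getD 0 0 := by
        simpa using cons_getD_shift x xs 0
      have e4 : (x :: xs).getD ((xs.takeWhile (fun y => y == x)).length) 0 = x :=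
        cons_getD_le x xs (Nat.le_refl _)
      have hh := d_head_ne x xs hne
      have hz : (((xs.takeWhile (fun y => y == x)).length + 1 == 0)) = false :=
        beq_eq_false_iff_ne.mpr (by omega)
      simp only [Function.comp_apply, cpCond, add_zero, Nat.add_sub_cancel, e3, e4, hz, hh]
      simp
    | succ k =>
      have e5 := cons_getD_shift x xs (k + 1)
      have e6 := cons_getD_shift x xs k
      have harith : (xs.takeWhile (fun y => y == x)).length + 1 + (k + 1) - 1
          = (xs.takeWhile (fun y => y == x)).length + 1 + k := by omega
      have hz : ((xs.takeWhile (fun y => y == x)).length + 1 + (k + 1) == 0) = false :=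
        beq_eq_false_iff_ne.mpr (by omega)
      have hz2 : ((k + 1 : Nat) == 0) = false := beq_eq_false_iff_ne.mpr (Nat.succ_ne_zero k)
      simp only [Function.comp_apply, cpCond, harith, e5, e6, Nat.add_sub_cancel, hz, hz2]
  rw [h1, h2]
  rfl

theorem rleCP_nil : rleCP [] = [] := rfl

-- shifting every position by m does not change the decoded runs
theorem shift_zip (m : Nat) (full d : List Int)
    (hgd : ∀ j, full.getD (m + j) 0 = d.getD j 0) (L M : List Nat) :
    ((L.map (fun j => m + j)).zip (M.map (fun j => m + j) ++ [m + d.length])).map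
        (fun st => (full.getD st.1 0, (st.2 : Int) - (st.1 : Int)))
      = (L.zip (M ++ [d.length])).map (fun st => (d.getD st.1 0, (st.2 : Int) - (st.1 : Int))) := by
  have h1 : M.map (fun j => m + j) ++ [m + d.length] = (M ++ [d.length]).map (fun j => m + j) := by
    simp
  rw [h1, List.zip_map, List.map_map]
  apply List.map_congr_left
  rintro ⟨s, u⟩ -
  simp only [Function.comp_apply, Prod.map, Prod.mk.injEq]
  exact ⟨hgd s, by push_cast; ring⟩

theorem rleCP_cons (x : Int) (xs : List Int) :
    rleCP (x :: xs) =
      (x, (((xs.takeWhile (fun y => y == x)).length + 1 : Nat) : Int))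
        :: rleCP (xs.dropWhile (fun y => y == x)) := by
  have hxs := len_split x xs
  have hlen : (x :: xs).length
      = ((xs.takeWhile (fun y => y == x)).length + 1) + (xs.dropWhile (fun y => y == x)).length := by
    simp only [List.length_cons]; omega
  rw [rleCP_eq, cpStarts_cons, hlen]
  by_cases hne : xs.dropWhile (fun y => y == x) = []
  · rw [hne]
    have hcs : cpStarts ([] : List Int) = [] := rfl
    rw [hcs]
    simp [rleCP_nil]
  · obtain ⟨T, hT⟩ : ∃ T, cpStarts (xs.dropWhile (fun y => y == x)) = 0 :: T := by
      obtain ⟨y, d', hD⟩ := List.exists_cons_of_ne_nil hne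
      exact ⟨_, by rw [hD]; exact cpStarts_cons y d'⟩
    rw [hT]
    have hdrop : ((0 : Nat) :: ((0 :: T).map
          (fun j => ((xs.takeWhile (fun y => y == x)).length + 1) + j))).drop 1
        = (0 :: T).map (fun j => ((xs.takeWhile (fun y => y == x)).length + 1) + j) := by
      simp
    rw [hdrop]
    simp only [List.map_cons, List.cons_append, List.zip_cons_cons]
    refine List.cons_eq_cons.mpr ⟨by simp, ?_⟩
    · have hh : ((xs.takeWhile (fun y => y == x)).length + 1 + 0)
            :: T.map (fun j => ((xs.takeWhile (fun y => y == x)).length + 1) + j)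
          = (0 :: T).map (fun j => ((xs.takeWhile (fun y => y == x)).length + 1) + j) := by
        simp
      rw [hh, shift_zip ((xs.takeWhile (fun y => y == x)).length + 1) (x :: xs)
            (xs.dropWhile (fun y => y == x)) (cons_getD_shift x xs) (0 :: T) T]
      rw [rleCP_eq, hT]
      simp only [List.drop_succ_cons, List.drop_zero]

theorem rleCP_eq_groupRuns : ∀ is : List Int, rleCP is = groupRuns is
  | [] => by rw [rleCP_nil, groupRuns.eq_def]
  | x :: xs => by
    rw [rleCP_cons, rleCP_eq_groupRuns (xs.dropWhile (fun y => y == x))]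
    conv_rhs => rw [groupRuns.eq_def]
    push_cast
    simp [add_comm]
termination_by is => is.length
decreasing_by
  simpa using Nat.lt_succ_of_le (List.length_dropWhile_le _ _)

-- ===== VERDICT (by name: the statement is the Claim_ definition above) =====
theorem generate_rle_indices_and_codebook_spec : Claim_equal_generate_rle_indices_and_codebook := by
  intro hc ff _ _
  unfold Spec_generate_rle_indices_and_codebook
  unfold generate_rle_indices_and_codebook generate_rle_indices_and_codebook_alt
  simp only [rleA_eq_rleIdx, rleIdx_none, rleCP_eq_groupRuns]
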